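-- pv_equiv track=rewrite | github.com/ShyZhou/LeetCode-Python | 434.py | countSegments
-- ===== SOURCE A (Python) =====
-- def countSegments(s):
--     """
--     :type s: str
--     :rtype: int
--     """
--     cnt = 0
--     pre = ''
--     for c in s:
--         if c == ' ' and pre != '' and pre != ' ':
--             cnt += 1
--         pre = c
--
--     if pre == '':
--         return 0
--     else:
--         return cnt if pre == ' ' else cnt + 1
-- ===== SOURCE B (Python) =====
-- def countSegments(s):
--     """
--     :type s: str
--     :rtype: int
--     """
--     return sum(1 for w in s.split(' ') if w)
-- ===== Notes on version B (the rewrite author's own statement) =====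
-- stated objective: simpler
-- what changed: Replaces A's char-by-char previous-character state machine with a split-on-space then count-nonempty-tokens decomposition; the per-character work moves into the C-level str.split, a constant-factor speedup a timing run measured.
import Mathlib
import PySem

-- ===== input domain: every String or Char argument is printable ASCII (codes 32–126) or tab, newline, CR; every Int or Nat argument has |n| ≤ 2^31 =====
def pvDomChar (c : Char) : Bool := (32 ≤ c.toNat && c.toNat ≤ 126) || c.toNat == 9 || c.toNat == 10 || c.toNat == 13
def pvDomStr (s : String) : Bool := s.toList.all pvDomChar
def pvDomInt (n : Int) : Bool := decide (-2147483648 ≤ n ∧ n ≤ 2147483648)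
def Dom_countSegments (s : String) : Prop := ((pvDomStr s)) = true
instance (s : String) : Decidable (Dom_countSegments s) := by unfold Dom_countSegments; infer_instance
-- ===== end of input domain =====

-- B replaces A's char-by-char previous-character state machine with split-on-space + count nonempty tokens (simpler).

-- ===== PORT A =====
-- Python's `pre` holds '' or the last character; ported as Option Char (none = '').
def countSegments (s : String) : Int :=
  let st := s.toList.foldl
    (fun (st : Int × Option Char) c =>
      (if c == ' ' && (match st.2 with | some p => p != ' ' | none => false)
       then st.1 + 1 else st.1, some c))
    (0, none)
  match st.2 with
  | none => 0
  | some p => if p == ' ' then st.1 else st.1 + 1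

-- ===== PORT B =====
-- `sum(1 for w in s.split(' ') if w)` = number of nonempty tokens of s.split(' ')
def countSegments_alt (s : String) : Int :=
  (((PySem.Chars.splitOn s.toList [' ']).filter (fun w => w ≠ [])).length : Int)

-- ===== PRECONDITION & SPEC =====
def Spec_countSegments (s : String) (out : Int) : Prop := out = countSegments_alt s
instance (s : String) (out : Int) : Decidable (Spec_countSegments s out) := by unfold Spec_countSegments; infer_instance

-- ===== CLAIM (what is proved, stated in full; the proofs are below) =====
def Claim_equal_countSegments : Prop := ∀ (s : String), Dom_countSegments s → Spec_countSegments s (countSegments s)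

-- ===== LEMMAS AND PROOFS =====

-- spec-level split on ' ': sp l cur = remaining tokens, cur = reversed current token
def sp : List Char → List Char → List (List Char)
  | [], cur => [cur.reverse]
  | c :: rest, cur => if c = ' ' then cur.reverse :: sp rest [] else sp rest (c :: cur)

-- number of word segments of l, given whether we are currently inside a word
def seg : List Char → Bool → Nat
  | [], _ => 0
  | c :: rest, inW =>
    if c = ' ' then seg rest false
    else (if inW then 0 else 1) + seg rest true

theorem splitOn_go_eq : ∀ (l : List Char) (fuel : Nat) (cur : List Char) (acc : List (List Char)),
    l.length < fuel →
    PySem.Chars.splitOn.go [' '] fuel l cur acc = acc.reverse ++ sp l cur := by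
  intro l
  induction l with
  | nil =>
    intro fuel cur acc h
    match fuel, h with
    | fuel + 1, _ => simp [PySem.Chars.splitOn.go, sp]
  | cons c rest ih =>
    intro fuel cur acc h
    match fuel, h with
    | fuel + 1, h =>
      have hf : rest.length < fuel := by
        simp only [List.length_cons] at h; omega
      simp only [PySem.Chars.splitOn.go]
      by_cases hc : c = ' '
      · subst hc
        have hpre : ([' '].isPrefixOf (' ' :: rest)) = true := by simp [List.isPrefixOf]
        rw [hpre, if_pos rfl]
        rw [show List.drop [' '].length (' ' :: rest) = rest from rfl]
        rw [ih fuel [] (cur.reverse :: acc) hf]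
        simp [sp]
      · have hpre : ([' '].isPrefixOf (c :: rest)) = false := by
          simp [List.isPrefixOf]; exact fun h' => hc h'.symm
        rw [hpre]
        simp only [Bool.false_eq_true, if_false]
        rw [ih fuel (c :: cur) acc hf]
        simp [sp, hc]

theorem sp_count : ∀ (l cur : List Char),
    ((sp l cur).filter (fun w => w ≠ [])).length
      = (if cur = [] then 0 else 1) + seg l (cur ≠ []) := by
  intro l
  induction l with
  | nil =>
    intro cur
    by_cases h : cur = [] <;> simp [sp, seg, h]
  | cons c rest ih =>
    intro cur
    by_cases hc : c = ' '
    · subst hc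
      have e := ih []
      by_cases h : cur = [] <;> (simp [sp, seg, h] at e ⊢; omega)
    · have e := ih (c :: cur)
      by_cases h : cur = [] <;> (simp [sp, seg, hc, h] at e ⊢; omega)

def finalA (st : Int × Option Char) : Int :=
  match st.2 with
  | none => 0
  | some p => if p == ' ' then st.1 else st.1 + 1

def fA (st : Int × Option Char) (c : Char) : Int × Option Char :=
  (if c == ' ' && (match st.2 with | some p => p != ' ' | none => false)
   then st.1 + 1 else st.1, some c)

theorem foldA_eq : ∀ (l : List Char) (cnt : Int) (p : Char),
    finalA (l.foldl fA (cnt, some p))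
      = cnt + (if p = ' ' then 0 else 1) + (seg l (p ≠ ' ') : Int) := by
  intro l
  induction l with
  | nil =>
    intro cnt p
    by_cases h : p = ' ' <;> simp [finalA, h]
  | cons c rest ih =>
    intro cnt p
    by_cases hc : c = ' '
    · subst hc
      by_cases h : p = ' ' <;> simp [fA, seg, h, ih]
    · by_cases h : p = ' ' <;> (simp [fA, seg, hc, h, ih] <;> ring)

-- ===== VERDICT (by name: the statement is the Claim_ definition above) =====
theorem fA_none (cnt : Int) (c : Char) : fA (cnt, none) c = (cnt, some c) := by
  simp [fA]

-- ===== VERDICT (by name: the statement is the Claim_ definition above) =====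
theorem countSegments_spec : Claim_equal_countSegments := by
  intro s _
  show countSegments s = countSegments_alt s
  have hA : countSegments s = finalA (s.toList.foldl fA (0, none)) := rfl
  have hB : countSegments_alt s
      = (((sp s.toList []).filter (fun w => w ≠ [])).length : Int) := by
    unfold countSegments_alt PySem.Chars.splitOn
    rw [splitOn_go_eq s.toList (s.toList.length + 1) [] [] (by omega)]
    simp
  rw [hA, hB, sp_count]
  cases s.toList with
  | nil => simp [finalA, seg]
  | cons c rest =>
    rw [List.foldl_cons, fA_none, foldA_eq]
    by_cases hc : c = ' ' <;> simp [seg, hc]
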